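-- pv_equiv track=rewrite | github.com/kapilrk-04/CodeMixToolkit | cs_metrics.py | spavg
-- ===== SOURCE A (Python) =====
-- LANG_TAGS = ['en', 'hi']
--
-- OTHER_TAGS = ['univ', 'ne','acro']
--
-- def spavg(x, k= 2):
--     LANG_TAGS = ['en', 'hi']
--     OTHER_TAGS = ['univ', 'ne','acro']
--
--     LANG_TAGS = [tag.lower() for tag in LANG_TAGS]
--     OTHER_TAGS = [tag.lower() for tag in OTHER_TAGS]
--     try:
--
--       x = [el.lower() for el in x]
--
--       if isinstance(x,str):
--           x = x.split()
--
--       x = [i for i in x if i in LANG_TAGS]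
--
--
--       count = 0
--       mem = None
--       for l_i, l_j in zip(x,x[1:]):
--           if l_i in OTHER_TAGS:
--               continue
--           if l_i != l_j:
--               count+=1
--
--       return count
--
--     except TypeError:
--       return None
-- ===== SOURCE B (Python) =====
-- from itertools import dropwhile
--
-- def spavg(x, k=2):
--     LANG_TAGS = ['en', 'hi']
--     try:
--         toks = [el.lower() for el in x]
--         if isinstance(toks, str):
--             toks = toks.split()
--         toks = [t for t in toks if t in LANG_TAGS]
--
--         # Count switch points by jumping run-to-run: drop the whole leading
--         # maximal run of equal labels; each remaining nonempty tail is one switch.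
--         def switches(seq):
--             if not seq:
--                 return 0
--             rest = list(dropwhile(lambda t, h=seq[0]: t == h, seq))
--             return 0 if not rest else 1 + switches(rest)
--
--         return switches(toks)
--     except TypeError:
--         return None
-- ===== Notes on version B (the rewrite author's own statement) =====
-- stated objective: alternative
-- what changed: Replaces the adjacent-pair zip scan (with its dead OTHER_TAGS guard) by a recursion over maximal runs: dropwhile strips the whole leading run of equal labels and each nonempty remainder contributes one switch, so no pairwise comparison of neighbours is performed.
import Mathlib
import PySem

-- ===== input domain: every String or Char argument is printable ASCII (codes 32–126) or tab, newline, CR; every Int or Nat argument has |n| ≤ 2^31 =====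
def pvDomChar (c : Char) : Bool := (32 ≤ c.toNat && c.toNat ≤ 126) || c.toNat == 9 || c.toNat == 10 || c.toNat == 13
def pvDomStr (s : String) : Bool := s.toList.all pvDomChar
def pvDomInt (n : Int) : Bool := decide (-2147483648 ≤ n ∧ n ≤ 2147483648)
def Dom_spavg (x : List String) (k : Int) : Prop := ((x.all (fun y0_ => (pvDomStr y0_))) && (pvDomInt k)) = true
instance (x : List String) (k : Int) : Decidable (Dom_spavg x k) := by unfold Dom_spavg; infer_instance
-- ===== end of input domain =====

-- B replaces A's adjacent-pair scan by a recursion over maximal runs (dropWhile strips each leading run; every nonempty remainder is one switch): an alternative decomposition, same cost.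


-- ===== PORT A =====
-- On List String inputs 'el.lower()' never raises TypeError, so the except branch is dead;
-- 'isinstance(x, str)' is always False for a list, so the split branch is dead (noted, not ported).
def spavg (x : List String) (k : Int) : Option Int :=
  let langTags : List String := (["en", "hi"]).map PySem.Str.lower
  let otherTags : List String := (["univ", "ne", "acro"]).map PySem.Str.lower
  let x1 := x.map PySem.Str.lower
  let x2 := x1.filter (fun i => langTags.contains i)
  let count := ((x2.zip (x2.drop 1)).foldl (fun c p =>
      if otherTags.contains p.1 then c
      else if p.1 ≠ p.2 then c + 1 else c) (0 : Int))
  some count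

-- ===== PORT B =====
-- Source B's 'switches': drop the whole leading maximal run; each nonempty remainder is one switch.
def pvSwitches (l : List String) : Int :=
  match l with
  | [] => 0
  | a :: t =>
    let rest := t.dropWhile (fun s => s == a)
    if rest.isEmpty then 0 else 1 + pvSwitches rest
termination_by l.length
decreasing_by
  simp only [List.length_cons]
  exact Nat.lt_succ_of_le (List.length_dropWhile_le _ _)

def spavg_alt (x : List String) (k : Int) : Option Int :=
  let langTags : List String := ["en", "hi"]
  let toks := (x.map PySem.Str.lower).filter (fun t => langTags.contains t)
  some (pvSwitches toks)

-- ===== PRECONDITION & SPEC =====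
def Spec_spavg (x : List String) (k : Int) (out : Option Int) : Prop := out = spavg_alt x k
instance (x : List String) (k : Int) (out : Option Int) : Decidable (Spec_spavg x k out) := by unfold Spec_spavg; infer_instance

-- ===== CLAIM (what is proved, stated in full; the proofs are below) =====
def Claim_equal_spavg : Prop := ∀ (x : List String) (k : Int), Dom_spavg x k → Spec_spavg x k (spavg x k)

-- ===== LEMMAS AND PROOFS =====

-- the run-peeling recursion satisfies the adjacent-pair recurrence
theorem pvSwitches_cons_cons (a b : String) (t : List String) :
    pvSwitches (a :: b :: t) = (if a = b then 0 else 1) + pvSwitches (b :: t) := by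
  by_cases hab : a = b
  · subst hab
    simp [pvSwitches, List.dropWhile]
  · have hb : (b == a) = false := by
      simp [beq_eq_false_iff_ne]; exact fun h => hab h.symm
    simp [pvSwitches, List.dropWhile, hb, hab]

-- the pair-scan (with a guard that never fires on elements of langTags) equals pvSwitches
theorem foldl_pairs_eq_switches (l : List String) (c : Int)
    (h : ∀ a ∈ l, ¬ ((["univ", "ne", "acro"] : List String).contains a = true)) :
    ((l.zip (l.drop 1)).foldl (fun c p =>
      if (["univ", "ne", "acro"] : List String).contains p.1 then c
      else if p.1 ≠ p.2 then c + 1 else c) c) = c + pvSwitches l := by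
  induction l generalizing c with
  | nil => simp [pvSwitches]
  | cons a rest ih =>
    cases rest with
    | nil => simp [pvSwitches]
    | cons b rest' =>
      have ha : ¬ ((["univ", "ne", "acro"] : List String).contains a = true) :=
        h a (by simp)
      have hrec := ih (c := if a ≠ b then c + 1 else c) (fun z hz => h z (by simp [hz]))
      simp only [List.drop, List.zip_cons_cons, List.foldl_cons] at *
      rw [if_neg ha, hrec, pvSwitches_cons_cons]
      generalize pvSwitches (b :: rest') = s
      split_ifs with h1 h2 <;> first | omega | (exfalso; exact h1 h2)

-- ===== VERDICT (by name: the statement is the Claim_ definition above) =====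
theorem spavg_spec : Claim_equal_spavg := by
  intro x k _
  unfold Spec_spavg spavg spavg_alt
  have hmap : ((["en", "hi"] : List String).map PySem.Str.lower) = ["en", "hi"] := by decide
  have hother : ((["univ", "ne", "acro"] : List String).map PySem.Str.lower) = ["univ", "ne", "acro"] := by decide
  simp only [hmap, hother]
  have hmem : ∀ a ∈ (x.map PySem.Str.lower).filter
      (fun i => (["en", "hi"] : List String).contains i),
      ¬ ((["univ", "ne", "acro"] : List String).contains a = true) := by
    intro a ha
    have h1 := List.of_mem_filter ha
    simp only [List.contains_eq_mem, List.mem_cons, List.not_mem_nil, or_false,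
      decide_eq_true_eq] at h1 ⊢
    rcases h1 with h | h <;> subst h <;> decide
  rw [foldl_pairs_eq_switches _ 0 hmem]
  simp
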